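-- pv_equiv track=rewrite | github.com/anonymousECRTS/emsoft184 | test-gen-bk.py | _compute_blocked_sccs
-- ===== SOURCE A (Python) =====
-- from typing import Dict, List, Tuple, Optional
--
-- def _compute_blocked_sccs(
--
--     num_sccs: int,
--     scc_dag_edges: List[Tuple[int, int]],
--     seed_deadlocked_sccs: List[int],
-- ) -> List[int]:
--     adj = {i: [] for i in range(num_sccs)}
--     for u, v in scc_dag_edges:
--         adj[u].append(v)
--
--     blocked = set(seed_deadlocked_sccs)
--     stack = list(seed_deadlocked_sccs)
--
--     while stack:
--         u = stack.pop()
--         for v in adj[u]: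
--             if v not in blocked:
--                 blocked.add(v)
--                 stack.append(v)
--
--     return sorted(blocked)
-- ===== SOURCE B (Python) =====
-- def _compute_blocked_sccs(num_sccs, scc_dag_edges, seed_deadlocked_sccs):
--     # Fixed-point iteration over the raw edge list with a boolean array indexed
--     # by SCC id (no dict, no set, no worklist): repeatedly sweep all edges,
--     # blocking the target of every edge whose source is already blocked, until
--     # a full sweep changes nothing; the index comprehension is already sorted.
--     blocked = [False] * num_sccs
--     for s in seed_deadlocked_sccs:
--         blocked[s] = True
--     changed = True
--     while changed:
--         changed = False
--         for u, v in scc_dag_edges: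
--             if blocked[u] and not blocked[v]:
--                 blocked[v] = True
--                 changed = True
--     return [i for i in range(num_sccs) if blocked[i]]
-- ===== Notes on version B (the rewrite author's own statement) =====
-- stated objective: alternative
-- what changed: Replaces A's adjacency-dict + LIFO worklist + set + sort by Bellman-Ford-style fixed-point iteration on a boolean array indexed by SCC id: repeated sweeps over the raw edge list block the target of any edge with a blocked source until a sweep changes nothing, and the sorted result falls out of a range comprehension.
-- outside the precondition, e.g. on _compute_blocked_sccs(2, [(1, 1), (1, 5)], [0]): A returns [0], B returns [0]
import Mathlib
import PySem

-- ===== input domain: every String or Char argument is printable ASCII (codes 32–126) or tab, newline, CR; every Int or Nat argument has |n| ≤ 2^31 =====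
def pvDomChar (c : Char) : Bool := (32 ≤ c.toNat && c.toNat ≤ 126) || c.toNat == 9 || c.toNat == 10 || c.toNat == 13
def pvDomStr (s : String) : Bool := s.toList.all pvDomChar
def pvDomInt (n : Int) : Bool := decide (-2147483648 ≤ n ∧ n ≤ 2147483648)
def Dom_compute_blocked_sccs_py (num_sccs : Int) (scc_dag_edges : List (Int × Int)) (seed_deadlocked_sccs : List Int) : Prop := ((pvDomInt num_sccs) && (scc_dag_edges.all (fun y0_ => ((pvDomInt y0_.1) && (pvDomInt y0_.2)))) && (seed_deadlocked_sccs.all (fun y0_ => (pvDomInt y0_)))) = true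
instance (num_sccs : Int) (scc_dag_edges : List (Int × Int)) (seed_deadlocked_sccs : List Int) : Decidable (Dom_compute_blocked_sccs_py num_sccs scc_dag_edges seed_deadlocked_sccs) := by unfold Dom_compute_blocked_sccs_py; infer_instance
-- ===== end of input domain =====

-- B replaces A's adjacency-dict + LIFO worklist traversal by Bellman-Ford-style fixed-point
-- iteration over the raw edge list (objective: alternative algorithm, no claim of speed).

-- ===== PORT A =====
-- Termination-measure helper for both loops: how many of the listed values are not yet blocked.
def pvCnt (vals : List Int) (b : PySem.Set Int) : Nat :=
  (vals.filter (fun x => !(PySem.Set.contains b x))).length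

-- A's inner 'for v in adj[u]: if v not in blocked: blocked.add(v); stack.append(v)'.
def pvInnerA (blocked : PySem.Set Int) (stack : List Int) : List Int → PySem.Set Int × List Int
  | [] => (blocked, stack)
  | v :: vs =>
      if PySem.Set.contains blocked v then pvInnerA blocked stack vs
      else pvInnerA (PySem.Set.add blocked v) (stack ++ [v]) vs

-- structure of one inner pass: both blocked and stack grow by the same fresh suffix
theorem pvInnerA_eq (l : List Int) : ∀ (b : PySem.Set Int) (s : List Int),
    ∃ ns : List Int, pvInnerA b s l = (b ++ ns, s ++ ns) ∧
      (∀ x ∈ ns, x ∈ l ∧ x ∉ b) ∧ (∀ x ∈ l, x ∈ b ∨ x ∈ ns) ∧ ns.Nodup := by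
  induction l with
  | nil => exact fun b s => ⟨[], by simp [pvInnerA], by simp, by simp, List.nodup_nil⟩
  | cons v vs ih =>
      intro b s
      by_cases hc : PySem.Set.contains b v = true
      · have hvb : v ∈ b := (PySem.Set.contains_iff b v).mp hc
        obtain ⟨ns, heq, h1, h2, h3⟩ := ih b s
        refine ⟨ns, by simpa [pvInnerA, hc, hvb] using heq, ?_, ?_, h3⟩
        · exact fun x hx => ⟨List.mem_cons_of_mem _ (h1 x hx).1, (h1 x hx).2⟩
        · intro x hx
          rcases List.mem_cons.mp hx with rfl | hx
          · exact Or.inl hvb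
          · exact h2 x hx
      · have hvb : v ∉ b := fun hm => hc ((PySem.Set.contains_iff b v).mpr hm)
        have hadd : PySem.Set.add b v = b ++ [v] := by
          simp [PySem.Set.add, hvb]
        obtain ⟨ns, heq, h1, h2, h3⟩ := ih (b ++ [v]) (s ++ [v])
        refine ⟨v :: ns, ?_, ?_, ?_, ?_⟩
        · simpa [pvInnerA, hc, hvb, hadd, List.append_assoc] using heq
        · intro x hx
          rcases List.mem_cons.mp hx with rfl | hx
          · exact ⟨by simp, hvb⟩
          · refine ⟨List.mem_cons_of_mem _ (h1 x hx).1, fun hb => (h1 x hx).2 ?_⟩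
            exact List.mem_append_left _ hb
        · intro x hx
          rcases List.mem_cons.mp hx with rfl | hx
          · exact Or.inr (by simp)
          · rcases h2 x hx with hb | hns
            · rcases List.mem_append.mp hb with hb | hb
              · exact Or.inl hb
              · exact Or.inr (by simp [List.mem_singleton.mp hb])
            · exact Or.inr (List.mem_cons_of_mem _ hns)
        · refine List.nodup_cons.mpr ⟨fun hv' => ?_, h3⟩
          exact (h1 v hv').2 (List.mem_append_right _ (List.mem_singleton.mpr rfl))

theorem pvCnt_le (vals : List Int) (b b' : PySem.Set Int)
    (hsub : ∀ x ∈ b, x ∈ b') : pvCnt vals b' ≤ pvCnt vals b := by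
  unfold pvCnt
  rw [← List.countP_eq_length_filter, ← List.countP_eq_length_filter]
  refine List.countP_mono_left fun x _ h => ?_
  simp only [Bool.not_eq_true'] at h ⊢
  cases hbx : PySem.Set.contains b x with
  | false => rfl
  | true =>
      exact absurd ((PySem.Set.contains_iff b' x).mpr
        (hsub x ((PySem.Set.contains_iff b x).mp hbx))) (by rw [h]; simp)

theorem pvCnt_lt (vals : List Int) (b b' : PySem.Set Int) (v : Int)
    (hsub : ∀ x ∈ b, x ∈ b') (hv : v ∈ vals) (hnb : v ∉ b) (hb' : v ∈ b') :
    pvCnt vals b' < pvCnt vals b := by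
  induction vals with
  | nil => cases hv
  | cons a tl ih =>
      have hcnt : ∀ (c : PySem.Set Int),
          pvCnt (a :: tl) c = (if a ∈ c then 0 else 1) + pvCnt tl c := by
        intro c
        by_cases h : a ∈ c
        · simp [pvCnt, h]
        · simp [pvCnt, h]
          omega
      rw [hcnt b, hcnt b']
      by_cases hab : a ∈ b
      · have hab' : a ∈ b' := hsub a hab
        have hvtl : v ∈ tl := by
          rcases List.mem_cons.mp hv with rfl | h
          · exact absurd hab hnb
          · exact h
        simpa [hab, hab'] using ih hvtl
      · have hle := pvCnt_le tl b b' hsub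
        rcases List.mem_cons.mp hv with rfl | hvtl
        · simp only [if_neg hab, if_pos hb']
          omega
        · have := ih hvtl
          by_cases hab' : a ∈ b' <;> simp [hab, hab'] <;> omega

-- every value stored in the dict occurs in d.values.flatten (used by A's termination measure)
theorem pvGetD_sub_flatten (d : PySem.Dict Int (List Int)) (k : Int) :
    ∀ x ∈ d.getD k [], x ∈ d.values.flatten := by
  obtain ⟨items⟩ := d
  induction items with
  | nil => intro x hx; simp [PySem.Dict.getD, PySem.Dict.get?] at hx
  | cons p tl ih =>
      obtain ⟨a, w⟩ := p
      intro x hx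
      have hget : (PySem.Dict.mk ((a, w) :: tl)).getD k [] =
          if (a == k) = true then w else (PySem.Dict.mk tl).getD k [] := by
        show ((PySem.Dict.mk ((a, w) :: tl)).get? k).getD [] = _
        rw [PySem.Dict.get?_mk_cons]
        by_cases h : (a == k) = true
        · simp [h]
        · simp [h]
          rfl
      rw [hget] at hx
      by_cases h : (a == k) = true
      · rw [if_pos h] at hx
        simp [PySem.Dict.values_mk]
        exact Or.inl hx
      · rw [if_neg h] at hx
        have := ih x hx
        simp [PySem.Dict.values_mk] at this ⊢
        exact Or.inr this

-- A's 'while stack:' loop (stack.pop() pops the LAST element).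
def pvLoopA (adj : PySem.Dict Int (List Int)) (blocked : PySem.Set Int) (stack : List Int) :
    PySem.Set Int :=
  if h : stack = [] then blocked
  else
    pvLoopA adj (pvInnerA blocked stack.dropLast (adj.getD (stack.getLast h) [])).1
      (pvInnerA blocked stack.dropLast (adj.getD (stack.getLast h) [])).2
termination_by (pvCnt adj.values.flatten blocked, stack.length)
decreasing_by
  rcases pvInnerA_eq (adj.getD (stack.getLast h) []) blocked stack.dropLast with
    ⟨ns, heq, hns, _, _⟩
  rw [heq]
  cases ns with
  | nil =>
      simp only [List.append_nil]
      exact Prod.Lex.right _ (by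
        have := List.length_pos_iff.mpr h
        simp [List.length_dropLast]; omega)
  | cons v vs =>
      exact Prod.Lex.left _ _ (pvCnt_lt _ blocked (blocked ++ v :: vs) v
        (fun x hx => List.mem_append_left _ hx)
        (pvGetD_sub_flatten adj _ v (hns v (by simp)).1)
        (hns v (by simp)).2
        (List.mem_append_right _ (by simp)))

-- Port of A. The dict comprehension '{i: [] for i in range(num_sccs)}' is built as its items
-- list directly (exact: range yields distinct keys in order). 'adj[u].append(v)' is
-- Dict.modify with default [] and 'adj[u]' in the loop is getD — both exact when u is a key
-- of adj, which Pre_ guarantees (outside Pre_ the Python raises KeyError, nothing claimed).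
def compute_blocked_sccs_py (num_sccs : Int) (scc_dag_edges : List (Int × Int)) (seed_deadlocked_sccs : List Int) : List Int :=
  let adj0 := PySem.Dict.mk
    ((PySem.List.pyRange 0 num_sccs 1).map (fun i => (i, ([] : List Int))))
  let adj := scc_dag_edges.foldl (fun d p => d.modify p.1 [] (fun l => l ++ [p.2])) adj0
  PySem.List.sorted
    (pvLoopA adj (PySem.Set.ofList seed_deadlocked_sccs) seed_deadlocked_sccs) (fun x => x)

-- ===== PORT B =====
-- Port of B (from Source B): blocked is the Python list of booleans indexed by SCC id;
-- blocked[u] reads / blocked[v] = True writes are pyGetD / pySetD (exact wherever the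
-- Python returns; where Python raises IndexError nothing is claimed, Pre_ excludes it).
def pvStepB (st : List Bool × Bool) (p : Int × Int) : List Bool × Bool :=
  if PySem.List.pyGetD st.1 p.1 false && !(PySem.List.pyGetD st.1 p.2 false)
  then (PySem.List.pySetD st.1 p.2 true, true) else st

-- one full 'for u, v in scc_dag_edges: …' sweep, threading (blocked, changed)
def pvSweepB (edges : List (Int × Int)) (st : List Bool × Bool) : List Bool × Bool :=
  edges.foldl pvStepB st

-- B's 'while changed:' loop. The fuel only makes the recursion total: each sweep that
-- reports a change flips at least one entry False→True on every input the Python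
-- terminates on, so blocked.length + 1 sweeps reach the Python's fixpoint there.
def pvLoopB (edges : List (Int × Int)) : Nat → List Bool → List Bool
  | 0, arr => arr
  | fuel + 1, arr =>
      if (pvSweepB edges (arr, false)).2
      then pvLoopB edges fuel (pvSweepB edges (arr, false)).1
      else arr

def compute_blocked_sccs_py_alt (num_sccs : Int) (scc_dag_edges : List (Int × Int)) (seed_deadlocked_sccs : List Int) : List Int :=
  let b0 := List.replicate num_sccs.toNat false
  let b1 := seed_deadlocked_sccs.foldl (fun arr s => PySem.List.pySetD arr s true) b0
  let r := pvLoopB scc_dag_edges (b1.length + 1) b1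
  (PySem.List.pyRange 0 num_sccs 1).filter (fun i => PySem.List.pyGetD r i false)

-- ===== PRECONDITION & SPEC =====
-- Over-approximations of the set of nodes A's traversal can reach from the seeds (every
-- reached node is a seed or the target of an edge whose source was reached): used by Pre_
-- to exempt edges that can never fire.
def pvR1 (edges : List (Int × Int)) (seeds : List Int) (x : Int) : Prop :=
  x ∈ seeds ∨ ∃ p ∈ edges, p.2 = x
def pvR2 (edges : List (Int × Int)) (seeds : List Int) (x : Int) : Prop :=
  x ∈ seeds ∨ ∃ p ∈ edges, p.2 = x ∧ pvR1 edges seeds p.1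
def pvR3 (edges : List (Int × Int)) (seeds : List Int) (x : Int) : Prop :=
  x ∈ seeds ∨ ∃ p ∈ edges, p.2 = x ∧ pvR2 edges seeds p.1

-- Pre_ requires edge sources and seeds in range(num_sccs), and edge targets in range for
-- every edge that could possibly fire (source in the pvR3 over-approximation of the nodes
-- reachable from the seeds; with no seeds no edge fires): outside it the Python A raises
-- KeyError on an out-of-range edge source, seed, or reached target, except that an
-- out-of-range edge target whose edge is never actually reached from the seeds still lets A
-- return normally (B returns the same sorted list on those inputs too; Pre_ is closed-form,
-- exact reachability is not).
def Pre_compute_blocked_sccs_py (num_sccs : Int) (scc_dag_edges : List (Int × Int)) (seed_deadlocked_sccs : List Int) : Prop :=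
  (∀ p ∈ scc_dag_edges, 0 ≤ p.1 ∧ p.1 < num_sccs) ∧
  (∀ s ∈ seed_deadlocked_sccs, 0 ≤ s ∧ s < num_sccs) ∧
  (seed_deadlocked_sccs = [] ∨
    ∀ p ∈ scc_dag_edges,
      pvR3 scc_dag_edges seed_deadlocked_sccs p.1 → (0 ≤ p.2 ∧ p.2 < num_sccs))
instance (num_sccs : Int) (scc_dag_edges : List (Int × Int)) (seed_deadlocked_sccs : List Int) : Decidable (Pre_compute_blocked_sccs_py num_sccs scc_dag_edges seed_deadlocked_sccs) := by unfold Pre_compute_blocked_sccs_py pvR3 pvR2 pvR1; infer_instance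

def pvWitness_compute_blocked_sccs_py : Int × (List (Int × Int)) × List Int :=
  (3, [(0, 1), (1, 2)], [0])

def Spec_compute_blocked_sccs_py (num_sccs : Int) (scc_dag_edges : List (Int × Int)) (seed_deadlocked_sccs : List Int) (out : List Int) : Prop := out = compute_blocked_sccs_py_alt num_sccs scc_dag_edges seed_deadlocked_sccs
instance (num_sccs : Int) (scc_dag_edges : List (Int × Int)) (seed_deadlocked_sccs : List Int) (out : List Int) : Decidable (Spec_compute_blocked_sccs_py num_sccs scc_dag_edges seed_deadlocked_sccs out) := by unfold Spec_compute_blocked_sccs_py; infer_instance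

-- ===== CLAIM (what is proved, stated in full; the proofs are below) =====
def Claim_equal_compute_blocked_sccs_py : Prop := ∀ (num_sccs : Int) (scc_dag_edges : List (Int × Int)) (seed_deadlocked_sccs : List Int), Dom_compute_blocked_sccs_py num_sccs scc_dag_edges seed_deadlocked_sccs → Pre_compute_blocked_sccs_py num_sccs scc_dag_edges seed_deadlocked_sccs → Spec_compute_blocked_sccs_py num_sccs scc_dag_edges seed_deadlocked_sccs (compute_blocked_sccs_py num_sccs scc_dag_edges seed_deadlocked_sccs)

-- ===== LEMMAS AND PROOFS =====

-- the pre-seeded empty-lists dict stores nothing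
theorem pvGetD_const_nil (l : List Int) (u : Int) :
    (PySem.Dict.mk (l.map (fun i => (i, ([] : List Int))))).getD u [] = [] := by
  induction l with
  | nil => rfl
  | cons a tl ih =>
      show ((PySem.Dict.mk (((a, ([] : List Int))) :: tl.map _)).get? u).getD [] = []
      rw [PySem.Dict.get?_mk_cons]
      by_cases h : (a == u) = true
      · simp [h]
      · simp only [h, Bool.false_eq_true, if_false]
        exact ih

-- membership in A's adjacency lists is exactly edge membership
theorem pvMem_adj (num_sccs : Int) (edges : List (Int × Int)) (u v : Int) :
    (v ∈ (edges.foldl (fun d p => d.modify p.1 [] (fun l => l ++ [p.2]))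
        (PySem.Dict.mk
          ((PySem.List.pyRange 0 num_sccs 1).map (fun i => (i, ([] : List Int)))))).getD u [])
      ↔ (u, v) ∈ edges := by
  rw [PySem.Dict.getD_foldl_modify_append, pvGetD_const_nil]
  simp only [List.nil_append, List.mem_map, List.mem_filter, beq_iff_eq]
  constructor
  · rintro ⟨⟨a, b⟩, ⟨hm, rfl⟩, rfl⟩
    exact hm
  · intro h
    exact ⟨(u, v), ⟨h, rfl⟩, rfl⟩

theorem pvLoopA_nodup (adj : PySem.Dict Int (List Int)) (blocked : PySem.Set Int)
    (stack : List Int) : blocked.Nodup → (pvLoopA adj blocked stack).Nodup := by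
  induction blocked, stack using pvLoopA.induct adj with
  | case1 b => intro hb; rw [pvLoopA]; simpa using hb
  | case2 b s h ih =>
      intro hb
      rw [pvLoopA, dif_neg h]
      rcases pvInnerA_eq (adj.getD (s.getLast h) []) b s.dropLast with ⟨ns, heq, h1, _, h3⟩
      rw [heq] at ih ⊢
      refine ih (List.nodup_append.mpr ⟨hb, h3, ?_⟩)
      intro x hx y hy hxy
      exact (h1 y hy).2 (hxy ▸ hx)

theorem pvLoopA_mono (adj : PySem.Dict Int (List Int)) (blocked : PySem.Set Int)
    (stack : List Int) : ∀ x ∈ blocked, x ∈ pvLoopA adj blocked stack := by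
  induction blocked, stack using pvLoopA.induct adj with
  | case1 b => intro x hx; rw [pvLoopA]; simpa using hx
  | case2 b s h ih =>
      intro x hx
      rw [pvLoopA, dif_neg h]
      rcases pvInnerA_eq (adj.getD (s.getLast h) []) b s.dropLast with ⟨ns, heq, _, _, _⟩
      rw [heq] at ih ⊢
      exact ih x (List.mem_append_left _ hx)

theorem pvLoopA_closed (adj : PySem.Dict Int (List Int)) (blocked : PySem.Set Int)
    (stack : List Int) :
    (∀ u ∈ blocked, u ∈ stack ∨ ∀ v ∈ adj.getD u [], v ∈ blocked) →
    ∀ u ∈ pvLoopA adj blocked stack, ∀ v ∈ adj.getD u [], v ∈ pvLoopA adj blocked stack := by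
  induction blocked, stack using pvLoopA.induct adj with
  | case1 b =>
      intro hinv u hu v hv
      rw [pvLoopA] at hu ⊢
      simp only at hu ⊢
      rcases hinv u hu with hc | hc
      · cases hc
      · exact hc v hv
  | case2 b s h ih =>
      intro hinv
      rw [pvLoopA, dif_neg h]
      rcases pvInnerA_eq (adj.getD (s.getLast h) []) b s.dropLast with ⟨ns, heq, h1, h2, _⟩
      rw [heq] at ih ⊢
      refine ih ?_
      intro u' hu'
      rcases List.mem_append.mp hu' with hub | huns
      · rcases hinv u' hub with hstack | hcl
        · have hsplit : s.dropLast ++ [s.getLast h] = s := List.dropLast_append_getLast h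
          rw [← hsplit] at hstack
          rcases List.mem_append.mp hstack with hdl | hlast
          · exact Or.inl (List.mem_append_left _ hdl)
          · have : u' = s.getLast h := List.mem_singleton.mp hlast
            subst this
            exact Or.inr (fun v hv => List.mem_append.mpr ((h2 v hv).imp id id))
        · exact Or.inr (fun v hv => List.mem_append_left _ (hcl v hv))
      · exact Or.inl (List.mem_append_right _ huns)

theorem pvLoopA_min (adj : PySem.Dict Int (List Int)) (T : Int → Prop)
    (hT : ∀ u, T u → ∀ v ∈ adj.getD u [], T v) (blocked : PySem.Set Int) (stack : List Int) :
    (∀ x ∈ blocked, T x) → (∀ x ∈ stack, T x) →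
    ∀ x ∈ pvLoopA adj blocked stack, T x := by
  induction blocked, stack using pvLoopA.induct adj with
  | case1 b =>
      intro hb _ x hx
      rw [pvLoopA] at hx
      simp only at hx
      exact hb x hx
  | case2 b s h ih =>
      intro hb hs
      rw [pvLoopA, dif_neg h]
      rcases pvInnerA_eq (adj.getD (s.getLast h) []) b s.dropLast with ⟨ns, heq, h1, _, _⟩
      rw [heq] at ih ⊢
      have hns : ∀ x ∈ ns, T x := by
        intro x hx
        exact hT (s.getLast h) (hs _ (List.getLast_mem h)) x (h1 x hx).1
      refine ih ?_ ?_
      · intro x hx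
        rcases List.mem_append.mp hx with hx | hx
        · exact hb x hx
        · exact hns x hx
      · intro x hx
        rcases List.mem_append.mp hx with hx | hx
        · exact hs x (List.dropLast_subset _ hx)
        · exact hns x hx

-- ---- B-side lemmas: boolean-array sweeps ----

-- how many entries are still False (termination/progress measure of the sweeps)
def pvCountF (arr : List Bool) : Nat := (arr.filter (fun b => !b)).length

theorem pvCountF_le_length (arr : List Bool) : pvCountF arr ≤ arr.length :=
  List.length_filter_le _ _

theorem pvCountF_set_true (arr : List Bool) (k : Nat) (hk : k < arr.length)
    (hf : arr.getD k false = false) : pvCountF (arr.set k true) < pvCountF arr := by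
  induction arr generalizing k with
  | nil => simp at hk
  | cons a tl ih =>
      cases k with
      | zero =>
          have ha : a = false := by simpa using hf
          subst ha
          simp [pvCountF, List.set, List.filter]
      | succ k =>
          have hk' : k < tl.length := by simpa using hk
          have hf' : tl.getD k false = false := by simpa using hf
          have := ih k hk' hf'
          unfold pvCountF at this ⊢
          cases a <;> simp [List.set, List.filter] <;> omega

-- reading after a write at a nonnegative in-range index
theorem pvGetSet (arr : List Bool) (s i : Int) (hs0 : 0 ≤ s) (hsn : s < (arr.length : Int))
    (hi0 : 0 ≤ i) :
    PySem.List.pyGetD (PySem.List.pySetD arr s true) i false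
      = if i = s then true else PySem.List.pyGetD arr i false := by
  rw [PySem.List.pySetD_of_nonneg arr true hs0, PySem.List.pyGetD_of_nonneg _ false hi0,
      PySem.List.pyGetD_of_nonneg arr false hi0]
  have hsl : s.toNat < arr.length := by omega
  by_cases h : i = s
  · subst h
    rw [if_pos rfl, List.getD_eq_getElem _ _ (by simpa using hsl)]
    simp
  · rw [if_neg h]
    have hne : s.toNat ≠ i.toNat := by omega
    rcases lt_or_ge i.toNat arr.length with hlt | hge
    · rw [List.getD_eq_getElem _ _ (by simpa using hlt), List.getD_eq_getElem _ _ hlt]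
      simp [hne]
    · rw [List.getD_eq_default _ _ (by simpa using hge), List.getD_eq_default _ _ hge]

theorem pvRep_false (k : Nat) (i : Int) (h0 : 0 ≤ i) :
    PySem.List.pyGetD (List.replicate k false) i false = false := by
  rw [PySem.List.pyGetD_of_nonneg _ false h0]
  rcases lt_or_ge i.toNat k with hlt | hge
  · rw [List.getD_eq_getElem _ _ (by simpa using hlt)]
    simp
  · exact List.getD_eq_default _ _ (by simpa using hge)

-- invariant of the sweeps: every blocked id is a seed or the target of an edge with a
-- blocked source (three unfoldings give the pvR3 over-approximation used by Pre_)
def pvGood (edges : List (Int × Int)) (seeds : List Int) (arr : List Bool) : Prop :=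
  ∀ i : Int, 0 ≤ i → PySem.List.pyGetD arr i false = true →
    (i ∈ seeds ∨ ∃ p ∈ edges, p.2 = i ∧ PySem.List.pyGetD arr p.1 false = true)

theorem pvGood_R3 (edges : List (Int × Int)) (seeds : List Int) (arr : List Bool)
    (hsrc : ∀ p ∈ edges, 0 ≤ p.1) (hgood : pvGood edges seeds arr) :
    ∀ u : Int, 0 ≤ u → PySem.List.pyGetD arr u false = true → pvR3 edges seeds u := by
  intro u hu0 hu
  rcases hgood u hu0 hu with hs | ⟨p, hp, hpe, hpt⟩
  · exact Or.inl hs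
  · refine Or.inr ⟨p, hp, hpe, ?_⟩
    rcases hgood p.1 (hsrc p hp) hpt with hs | ⟨q, hq, hqe, hqt⟩
    · exact Or.inl hs
    · refine Or.inr ⟨q, hq, hqe, ?_⟩
      rcases hgood q.1 (hsrc q hq) hqt with hs | ⟨r, hr, hre, _⟩
      · exact Or.inl hs
      · exact Or.inr ⟨r, hr, hre⟩

-- once the changed flag is true it stays true
theorem pvSweepB_flag (l : List (Int × Int)) : ∀ (st : List Bool × Bool), st.2 = true →
    (l.foldl pvStepB st).2 = true := by
  induction l with
  | nil => intro st h; exact h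
  | cons p tl ih =>
      intro st h
      rw [List.foldl_cons]
      unfold pvStepB
      split
      · exact ih _ rfl
      · exact ih _ h

-- a sweep that reports no change left the array unchanged and found it edge-closed
theorem pvSweepB_fix (l : List (Int × Int)) : ∀ (arr : List Bool),
    (l.foldl pvStepB (arr, false)).2 = false →
    (l.foldl pvStepB (arr, false)).1 = arr ∧
      ∀ p ∈ l, PySem.List.pyGetD arr p.1 false = true →
        PySem.List.pyGetD arr p.2 false = true := by
  induction l with
  | nil => intro arr _; exact ⟨rfl, by simp⟩
  | cons p tl ih =>
      intro arr hf
      rw [List.foldl_cons] at hf ⊢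
      by_cases hc : (PySem.List.pyGetD arr p.1 false
          && !(PySem.List.pyGetD arr p.2 false)) = true
      · rw [show pvStepB (arr, false) p = (PySem.List.pySetD arr p.2 true, true) by
            unfold pvStepB; rw [if_pos hc]] at hf
        rw [pvSweepB_flag tl _ rfl] at hf
        cases hf
      · rw [show pvStepB (arr, false) p = (arr, false) by
            unfold pvStepB; rw [if_neg hc]] at hf ⊢
        obtain ⟨h1, h2⟩ := ih arr hf
        refine ⟨h1, fun q hq hq1 => ?_⟩
        rcases List.mem_cons.mp hq with rfl | hq
        · simp only [Bool.and_eq_true, Bool.not_eq_true'] at hc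
          by_contra hq2
          exact hc ⟨hq1, Bool.eq_false_iff.mpr hq2⟩
        · exact h2 q hq hq1

-- a sweep over an array with no enabled edge does nothing
theorem pvSweepB_nofire (l : List (Int × Int)) : ∀ (arr : List Bool),
    (∀ p ∈ l, PySem.List.pyGetD arr p.1 false = false) →
    l.foldl pvStepB (arr, false) = (arr, false) := by
  induction l with
  | nil => intro arr _; rfl
  | cons p tl ih =>
      intro arr h
      rw [List.foldl_cons,
        show pvStepB (arr, false) p = (arr, false) by
          unfold pvStepB; rw [if_neg (by simp [h p List.mem_cons_self])]]
      exact ih arr (fun q hq => h q (List.mem_cons_of_mem _ hq))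

-- master invariant of one sweep: length, pvGood, T-membership and monotonicity are
-- preserved, the False-count never grows, and a newly raised flag means it shrank
theorem pvSweepB_master (edges : List (Int × Int)) (seeds : List Int) (n : Int)
    (T : Int → Prop)
    (hsrc : ∀ p ∈ edges, 0 ≤ p.1 ∧ p.1 < n)
    (htgt : ∀ p ∈ edges, pvR3 edges seeds p.1 → 0 ≤ p.2 ∧ p.2 < n)
    (hT : ∀ p ∈ edges, T p.1 → T p.2) :
    ∀ (l : List (Int × Int)), (∀ p ∈ l, p ∈ edges) → ∀ (st : List Bool × Bool),
    st.1.length = n.toNat → pvGood edges seeds st.1 →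
    (∀ i : Int, 0 ≤ i → PySem.List.pyGetD st.1 i false = true → T i) →
      (l.foldl pvStepB st).1.length = n.toNat ∧
      pvGood edges seeds (l.foldl pvStepB st).1 ∧
      (∀ i : Int, 0 ≤ i → PySem.List.pyGetD (l.foldl pvStepB st).1 i false = true → T i) ∧
      (∀ i : Int, 0 ≤ i → PySem.List.pyGetD st.1 i false = true →
        PySem.List.pyGetD (l.foldl pvStepB st).1 i false = true) ∧
      pvCountF (l.foldl pvStepB st).1 ≤ pvCountF st.1 ∧
      ((l.foldl pvStepB st).2 = true →
        st.2 = true ∨ pvCountF (l.foldl pvStepB st).1 < pvCountF st.1) := by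
  intro l
  induction l with
  | nil =>
      intro _ st hlen hgood hTst
      exact ⟨hlen, hgood, hTst, fun _ _ h => h, le_refl _, fun h => Or.inl h⟩
  | cons p tl ih =>
      intro hl st hlen hgood hTst
      have hp : p ∈ edges := hl p List.mem_cons_self
      have hl' : ∀ q ∈ tl, q ∈ edges := fun q hq => hl q (List.mem_cons_of_mem _ hq)
      rw [List.foldl_cons]
      by_cases hc : (PySem.List.pyGetD st.1 p.1 false
          && !(PySem.List.pyGetD st.1 p.2 false)) = true
      · -- the edge fires: its source is blocked in range, its target is fresh
        simp only [Bool.and_eq_true, Bool.not_eq_true'] at hc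
        have hu := hsrc p hp
        have hR3 : pvR3 edges seeds p.1 :=
          pvGood_R3 edges seeds st.1 (fun q hq => (hsrc q hq).1) hgood p.1 hu.1 hc.1
        have hv := htgt p hp hR3
        have hvl : p.2 < (st.1.length : Int) := by omega
        have hstep : pvStepB st p = (PySem.List.pySetD st.1 p.2 true, true) := by
          unfold pvStepB
          rw [if_pos (by simp [hc.1, hc.2])]
        rw [hstep]
        have hget : ∀ i : Int, 0 ≤ i →
            PySem.List.pyGetD (PySem.List.pySetD st.1 p.2 true) i false
              = if i = p.2 then true else PySem.List.pyGetD st.1 i false :=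
          fun i hi0 => pvGetSet st.1 p.2 i hv.1 hvl hi0
        have hlen' : (PySem.List.pySetD st.1 p.2 true).length = n.toNat := by
          rw [PySem.List.length_pySetD]; exact hlen
        have hgood' : pvGood edges seeds (PySem.List.pySetD st.1 p.2 true) := by
          intro i hi0 hit
          rw [hget i hi0] at hit
          by_cases hip : i = p.2
          · subst hip
            exact Or.inr ⟨p, hp, rfl, by rw [hget p.1 hu.1]; split <;> simp [hc.1]⟩
          · rw [if_neg hip] at hit
            rcases hgood i hi0 hit with hs | ⟨q, hq, hqe, hqt⟩
            · exact Or.inl hs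
            · exact Or.inr ⟨q, hq, hqe, by
                rw [hget q.1 (hsrc q hq).1]; split <;> simp [hqt]⟩
        have hT' : ∀ i : Int, 0 ≤ i →
            PySem.List.pyGetD (PySem.List.pySetD st.1 p.2 true) i false = true → T i := by
          intro i hi0 hit
          rw [hget i hi0] at hit
          by_cases hip : i = p.2
          · subst hip; exact hT p hp (hTst p.1 hu.1 hc.1)
          · rw [if_neg hip] at hit; exact hTst i hi0 hit
        have hmono : ∀ i : Int, 0 ≤ i → PySem.List.pyGetD st.1 i false = true →
            PySem.List.pyGetD (PySem.List.pySetD st.1 p.2 true) i false = true := by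
          intro i hi0 hit
          rw [hget i hi0]; split <;> simp [hit]
        have hcnt : pvCountF (PySem.List.pySetD st.1 p.2 true) < pvCountF st.1 := by
          rw [PySem.List.pySetD_of_nonneg st.1 true hv.1]
          refine pvCountF_set_true st.1 p.2.toNat (by omega) ?_
          rw [PySem.List.pyGetD_of_nonneg st.1 false hv.1] at hc
          exact hc.2
        obtain ⟨r1, r2, r3, r4, r5, _⟩ :=
          ih hl' (PySem.List.pySetD st.1 p.2 true, true) hlen' hgood' hT'
        refine ⟨r1, r2, r3, fun i hi0 hit => r4 i hi0 (hmono i hi0 hit),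
          le_of_lt (lt_of_le_of_lt r5 hcnt), fun _ => Or.inr (lt_of_le_of_lt r5 hcnt)⟩
      · rw [show pvStepB st p = st by unfold pvStepB; rw [if_neg hc]]
        exact ih hl' st hlen hgood hTst

theorem pvLoopB_succ (edges : List (Int × Int)) (fuel : Nat) (arr : List Bool) :
    pvLoopB edges (fuel + 1) arr
      = if (pvSweepB edges (arr, false)).2
        then pvLoopB edges fuel (pvSweepB edges (arr, false)).1 else arr := rfl

-- master invariant of the whole while-loop, by induction on the fuel
theorem pvLoopB_master (edges : List (Int × Int)) (seeds : List Int) (n : Int)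
    (T : Int → Prop)
    (hsrc : ∀ p ∈ edges, 0 ≤ p.1 ∧ p.1 < n)
    (htgt : ∀ p ∈ edges, pvR3 edges seeds p.1 → 0 ≤ p.2 ∧ p.2 < n)
    (hT : ∀ p ∈ edges, T p.1 → T p.2) :
    ∀ (fuel : Nat) (arr : List Bool), arr.length = n.toNat → pvGood edges seeds arr →
    (∀ i : Int, 0 ≤ i → PySem.List.pyGetD arr i false = true → T i) →
    pvCountF arr < fuel →
      (pvLoopB edges fuel arr).length = n.toNat ∧
      pvGood edges seeds (pvLoopB edges fuel arr) ∧
      (∀ i : Int, 0 ≤ i → PySem.List.pyGetD (pvLoopB edges fuel arr) i false = true → T i) ∧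
      (∀ i : Int, 0 ≤ i → PySem.List.pyGetD arr i false = true →
        PySem.List.pyGetD (pvLoopB edges fuel arr) i false = true) ∧
      (∀ p ∈ edges, PySem.List.pyGetD (pvLoopB edges fuel arr) p.1 false = true →
        PySem.List.pyGetD (pvLoopB edges fuel arr) p.2 false = true) := by
  intro fuel
  induction fuel with
  | zero => intro arr _ _ _ hcnt; omega
  | succ fuel ih =>
      intro arr hlen hgood hTarr hcnt
      obtain ⟨m1, m2, m3, m4, m5, m6⟩ :=
        pvSweepB_master edges seeds n T hsrc htgt hT edges (fun _ h => h) (arr, false)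
          hlen hgood hTarr
      cases hfl : (pvSweepB edges (arr, false)).2 with
      | true =>
          have hlt : pvCountF (pvSweepB edges (arr, false)).1 < pvCountF arr := by
            rcases m6 hfl with h | h
            · cases h
            · exact h
          have hstep : pvLoopB edges (fuel + 1) arr
              = pvLoopB edges fuel (pvSweepB edges (arr, false)).1 := by
            rw [pvLoopB_succ, hfl]; simp
          rw [hstep]
          obtain ⟨r1, r2, r3, r4, r5⟩ :=
            ih (pvSweepB edges (arr, false)).1 m1 m2 m3 (by omega)
          exact ⟨r1, r2, r3, fun i hi0 hit => r4 i hi0 (m4 i hi0 hit), r5⟩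
      | false =>
          have hstep : pvLoopB edges (fuel + 1) arr = arr := by
            rw [pvLoopB_succ, hfl]; simp
          rw [hstep]
          exact ⟨hlen, hgood, hTarr, fun _ _ h => h,
            (pvSweepB_fix edges arr hfl).2⟩

-- the seeding pass: length is preserved and an id reads True iff it was already True
-- or is a listed seed (all seeds in range)
theorem pvInit_len (seeds : List Int) : ∀ (arr : List Bool),
    (seeds.foldl (fun a s => PySem.List.pySetD a s true) arr).length = arr.length := by
  induction seeds with
  | nil => intro arr; rfl
  | cons s tl ih =>
      intro arr
      rw [List.foldl_cons, ih, PySem.List.length_pySetD]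

theorem pvInit_mem (n : Int) (seeds : List Int) (hseed : ∀ s ∈ seeds, 0 ≤ s ∧ s < n) :
    ∀ (arr : List Bool), arr.length = n.toNat → ∀ i : Int, 0 ≤ i →
    (PySem.List.pyGetD (seeds.foldl (fun a s => PySem.List.pySetD a s true) arr) i false = true
      ↔ PySem.List.pyGetD arr i false = true ∨ i ∈ seeds) := by
  induction seeds with
  | nil => intro arr _ i _; simp
  | cons s tl ih =>
      intro arr hlen i hi0
      have hs := hseed s List.mem_cons_self
      have hsl : s < (arr.length : Int) := by omega
      rw [List.foldl_cons,
        ih (fun q hq => hseed q (List.mem_cons_of_mem _ hq)) _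
          (by rw [PySem.List.length_pySetD]; exact hlen) i hi0,
        pvGetSet arr s i hs.1 hsl hi0]
      by_cases hip : i = s
      · subst hip; simp
      · rw [if_neg hip]
        simp [hip]

-- ===== VERDICT (by name: the statement is the Claim_ definition above) =====
theorem compute_blocked_sccs_py_spec : Claim_equal_compute_blocked_sccs_py := by
  intro num_sccs edges seeds _hdom hpre
  obtain ⟨hsrc, hseed, hpre3⟩ := hpre
  unfold Spec_compute_blocked_sccs_py compute_blocked_sccs_py compute_blocked_sccs_py_alt
  dsimp only
  set adjA := edges.foldl (fun d p => d.modify p.1 [] (fun l => l ++ [p.2]))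
    (PySem.Dict.mk
      ((PySem.List.pyRange 0 num_sccs 1).map (fun i => (i, ([] : List Int))))) with hadjA
  set S0 := PySem.Set.ofList seeds with hS0
  set SA := pvLoopA adjA S0 seeds with hSA
  have hmem : ∀ u v, v ∈ adjA.getD u [] ↔ (u, v) ∈ edges := fun u v =>
    pvMem_adj num_sccs edges u v
  set b0 := List.replicate num_sccs.toNat false with hb0
  set b1 := seeds.foldl (fun arr s => PySem.List.pySetD arr s true) b0 with hb1
  set R := pvLoopB edges (b1.length + 1) b1 with hR
  by_cases hsE : seeds = []
  · -- no seeds: A's worklist is empty, B's array stays all-False; both return []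
    subst hsE
    have hA : SA = [] := by rw [hSA, hS0, pvLoopA]; rfl
    have hB : R = b1 := by
      have hb1b0 : b1 = b0 := rfl
      have hnf : pvSweepB edges (b1, false) = (b1, false) := by
        refine pvSweepB_nofire edges b1 (fun p hp => ?_)
        rw [hb1b0, hb0]
        exact pvRep_false _ _ (hsrc p hp).1
      rw [hR, pvLoopB_succ, hnf]
      simp
    rw [hA]
    have hfilter : ((PySem.List.pyRange 0 num_sccs 1).filter
        (fun i => PySem.List.pyGetD R i false)) = [] := by
      refine List.filter_eq_nil_iff.mpr (fun i hi => ?_)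
      have hi0 : 0 ≤ i := (PySem.List.mem_pyRange_one.mp hi).1
      rw [hB, show b1 = b0 from rfl, hb0, pvRep_false _ _ hi0]
      simp
    rw [hfilter]
    rfl
  · -- at least one seed: run the two master invariants against each other
    have htgt : ∀ p ∈ edges, pvR3 edges seeds p.1 → 0 ≤ p.2 ∧ p.2 < num_sccs :=
      hpre3.resolve_left hsE
    obtain ⟨s0, hs0⟩ := List.exists_mem_of_ne_nil seeds hsE
    have hn : 0 < num_sccs := by have := hseed s0 hs0; omega
    have hlen1 : b1.length = num_sccs.toNat := by
      rw [hb1, pvInit_len, hb0, List.length_replicate]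
    have hinit : ∀ i : Int, 0 ≤ i →
        (PySem.List.pyGetD b1 i false = true ↔ i ∈ seeds) := by
      intro i hi0
      rw [hb1, pvInit_mem num_sccs seeds hseed b0 (by rw [hb0, List.length_replicate]) i hi0]
      constructor
      · rintro (h | h)
        · rw [hb0, pvRep_false _ _ hi0] at h; cases h
        · exact h
      · exact Or.inr
    have hgood1 : pvGood edges seeds b1 := by
      intro i hi0 hit
      exact Or.inl ((hinit i hi0).mp hit)
    have hTSA : ∀ p ∈ edges, p.1 ∈ SA → p.2 ∈ SA := by
      intro p hp h1
      exact pvLoopA_closed adjA S0 seeds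
        (fun u' hu' => Or.inl ((PySem.Set.mem_ofList seeds u').mp hu')) p.1 h1 p.2
        ((hmem p.1 p.2).mpr hp)
    have hT1 : ∀ i : Int, 0 ≤ i → PySem.List.pyGetD b1 i false = true → i ∈ SA := by
      intro i hi0 hit
      exact pvLoopA_mono adjA S0 seeds i
        ((PySem.Set.mem_ofList seeds i).mpr ((hinit i hi0).mp hit))
    obtain ⟨m1, m2, m3, m4, m5⟩ :=
      pvLoopB_master edges seeds num_sccs (fun y => y ∈ SA) hsrc htgt hTSA
        (b1.length + 1) b1 hlen1 hgood1 hT1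
        (Nat.lt_succ_of_le (pvCountF_le_length b1))
    -- SA ⊆ R (as in-range True entries)
    have hAR : ∀ x ∈ SA, 0 ≤ x ∧ x < num_sccs ∧ PySem.List.pyGetD R x false = true := by
      refine pvLoopA_min adjA
        (fun y => 0 ≤ y ∧ y < num_sccs ∧ PySem.List.pyGetD R y false = true) ?_ S0 seeds ?_ ?_
      · intro u hu v hv
        have hpe : (u, v) ∈ edges := (hmem u v).mp hv
        have hvt : PySem.List.pyGetD R v false = true := m5 (u, v) hpe hu.2.2
        have hR3 : pvR3 edges seeds u :=
          pvGood_R3 edges seeds R (fun q hq => (hsrc q hq).1) m2 u hu.1 hu.2.2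
        have := htgt (u, v) hpe hR3
        exact ⟨this.1, this.2, hvt⟩
      · intro x hx
        have hxs : x ∈ seeds := (PySem.Set.mem_ofList seeds x).mp (hS0 ▸ hx)
        exact ⟨(hseed x hxs).1, (hseed x hxs).2,
          m4 x (hseed x hxs).1 ((hinit x (hseed x hxs).1).mpr hxs)⟩
      · intro x hx
        exact ⟨(hseed x hx).1, (hseed x hx).2,
          m4 x (hseed x hx).1 ((hinit x (hseed x hx).1).mpr hx)⟩
    -- membership in B's output list
    set F := (PySem.List.pyRange 0 num_sccs 1).filter
      (fun i => PySem.List.pyGetD R i false) with hF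
    have hFmem : ∀ x : Int, x ∈ F ↔ x ∈ SA := by
      intro x
      rw [hF, List.mem_filter, PySem.List.mem_pyRange_one]
      constructor
      · rintro ⟨⟨hx0, hxn⟩, hxt⟩
        exact m3 x hx0 hxt
      · intro hx
        obtain ⟨h0, h1, h2⟩ := hAR x hx
        exact ⟨⟨h0, h1⟩, h2⟩
    have hFpair : F.Pairwise (· < ·) :=
      (PySem.List.pairwise_lt_pyRange_one 0 num_sccs).filter _
    have hperm : F.Perm SA :=
      (List.perm_ext_iff_of_nodup (hFpair.imp ne_of_lt)
        (pvLoopA_nodup adjA S0 seeds (PySem.Set.nodup_ofList seeds))).mpr hFmem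
    exact PySem.List.sorted_eq_of_perm_of_pairwise_lt SA F (fun x => x) hperm
      (by simpa using hFpair)
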